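-- pv_equiv track=rewrite | github.com/SubhPB/leet-code | src/app/2026/contests/C487.py | finalElement
-- ===== SOURCE A (Python) =====
-- from typing import List
--
-- def finalElement(nums: List[int]) -> int:
--     l=0;r=len(nums)-1;t=1
--     while l<r:
--         mxi=l;mni=l
--         for i in range(l,r+1):
--             if nums[mxi]<=nums[i]:mxi=i
--             if nums[mni]>=nums[i]:mni=i
--         if mxi==mni: break
--         if t%2: #Alice's turn
--             if mni<mxi: l=mxi
--             else: r=mxi
--         else: #Bob's turn
--             if mni<mxi: r=mni
--             else: l=mni
--         t+=1
--     return nums[l]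
-- ===== SOURCE B (Python) =====
-- from typing import List
--
-- def finalElement(nums: List[int]) -> int:
--     # Precompute last-occurrence arg-max/arg-min of every suffix and prefix,
--     # then play the rounds with table lookups instead of rescanning the window.
--     n = len(nums)
--     # suffix tables, stored right-to-left: sufmax[n - 1 - i] is the last index
--     # attaining max(nums[i:]); sufmin likewise for the minimum.
--     sufmax = [n - 1]
--     sufmin = [n - 1]
--     i = n - 2
--     while i >= 0:
--         pm = sufmax[-1]
--         pn = sufmin[-1]
--         sufmax.append(i if nums[i] > nums[pm] else pm)
--         sufmin.append(i if nums[i] < nums[pn] else pn)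
--         i -= 1
--     # prefix tables: premax[j] is the last index attaining max(nums[:j+1]).
--     premax = [0]
--     premin = [0]
--     j = 1
--     while j < n:
--         pm = premax[-1]
--         pn = premin[-1]
--         premax.append(j if nums[j] >= nums[pm] else pm)
--         premin.append(j if nums[j] <= nums[pn] else pn)
--         j += 1
--     l = 0
--     r = n - 1
--     alice = True
--     while l < r:
--         if r == n - 1:
--             mxi = sufmax[n - 1 - l]
--             mni = sufmin[n - 1 - l]
--         else:
--             mxi = premax[r]
--             mni = premin[r]
--         if mxi == mni:
--             break
--         if alice:
--             if mni < mxi: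
--                 l = mxi
--             else:
--                 r = mxi
--         else:
--             if mni < mxi:
--                 r = mni
--             else:
--                 l = mni
--         alice = not alice
--     return nums[l]
-- ===== Notes on version B (the rewrite author's own statement) =====
-- stated objective: alternative
-- what changed: B precomputes prefix/suffix last-occurrence arg-max/arg-min tables in one linear pass each and plays every round of the shrinking-window game with O(1) table lookups instead of A's O(window) rescan per round.
-- outside the precondition, e.g. on finalElement([]): A raises IndexError, B raises IndexError
import Mathlib
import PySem

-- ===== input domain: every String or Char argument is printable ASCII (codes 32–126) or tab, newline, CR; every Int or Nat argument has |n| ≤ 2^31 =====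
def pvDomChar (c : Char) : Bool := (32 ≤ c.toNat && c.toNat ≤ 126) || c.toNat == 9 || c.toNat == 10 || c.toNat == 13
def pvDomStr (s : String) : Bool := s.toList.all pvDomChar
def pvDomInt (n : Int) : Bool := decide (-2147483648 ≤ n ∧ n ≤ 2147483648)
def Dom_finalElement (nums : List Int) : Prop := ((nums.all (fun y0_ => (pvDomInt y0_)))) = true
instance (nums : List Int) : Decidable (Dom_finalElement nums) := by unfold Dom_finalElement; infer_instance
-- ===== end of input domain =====

-- B (alternative algorithm): precomputed prefix/suffix last-arg-extreme tables
-- answer each round's window scan with a single lookup; not measurably faster on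
-- random inputs. Equivalence is proved on Pre_ (nonempty lists).

-- ===== PORT A =====
-- nums[i]: indices reached are always in range on Pre_; pyGetD is exact there.
def pvGetI (nums : List Int) (i : Int) : Int := PySem.List.pyGetD nums i 0

-- the inner 'for i in range(l, r+1)' updating mxi and mni
def finalElementScan (nums : List Int) (l r : Int) : Int × Int :=
  (PySem.List.pyRange l (r + 1) 1).foldl
    (fun st i =>
      (if pvGetI nums st.1 ≤ pvGetI nums i then i else st.1,
       if pvGetI nums st.2 ≥ pvGetI nums i then i else st.2)) (l, l)

-- the 'while l<r' loop; fuel bounds the iteration count (each round shrinks r-l,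
-- so nums.length iterations always suffice)
def finalElementLoop (nums : List Int) : Nat → Int → Int → Int → Int
  | 0, l, _, _ => pvGetI nums l
  | fuel + 1, l, r, t =>
    if l < r then
      let p := finalElementScan nums l r
      if p.1 = p.2 then pvGetI nums l
      else if PySem.Int.mod t 2 ≠ 0 then
        if p.2 < p.1 then finalElementLoop nums fuel p.1 r (t + 1)
        else finalElementLoop nums fuel l p.1 (t + 1)
      else
        if p.2 < p.1 then finalElementLoop nums fuel l p.2 (t + 1)
        else finalElementLoop nums fuel p.2 r (t + 1)
    else pvGetI nums l

def finalElement (nums : List Int) : Int :=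
  finalElementLoop nums nums.length 0 ((nums.length : Int) - 1) 1

-- ===== PORT B =====
-- 'while i >= 0' building sufmax/sufmin right-to-left (sufmax[-1] is the last
-- appended entry, read with pyGetD _ (-1))
def pvSufBuild (nums : List Int) (i : Int) (mx mn : List Int) : List Int × List Int :=
  if _h : 0 ≤ i then
    let pm := PySem.List.pyGetD mx (-1) 0
    let pn := PySem.List.pyGetD mn (-1) 0
    pvSufBuild nums (i - 1)
      (mx ++ [if pvGetI nums i > pvGetI nums pm then i else pm])
      (mn ++ [if pvGetI nums i < pvGetI nums pn then i else pn])
  else (mx, mn)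
  termination_by (i + 1).toNat
  decreasing_by omega

-- 'while j < n' building premax/premin
def pvPreBuild (nums : List Int) (n j : Int) (mx mn : List Int) : List Int × List Int :=
  if _h : j < n then
    let pm := PySem.List.pyGetD mx (-1) 0
    let pn := PySem.List.pyGetD mn (-1) 0
    pvPreBuild nums n (j + 1)
      (mx ++ [if pvGetI nums j ≥ pvGetI nums pm then j else pm])
      (mn ++ [if pvGetI nums j ≤ pvGetI nums pn then j else pn])
  else (mx, mn)
  termination_by (n - j).toNat
  decreasing_by omega

-- B's 'while l < r' game loop with O(1) table lookups
def finalElementAltLoop (nums : List Int) (n : Int) (smx smn pmx pmn : List Int) :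
    Nat → Int → Int → Bool → Int
  | 0, l, _, _ => pvGetI nums l
  | fuel + 1, l, r, alice =>
    if l < r then
      let mxi := if r = n - 1 then PySem.List.pyGetD smx (n - 1 - l) 0
                 else PySem.List.pyGetD pmx r 0
      let mni := if r = n - 1 then PySem.List.pyGetD smn (n - 1 - l) 0
                 else PySem.List.pyGetD pmn r 0
      if mxi = mni then pvGetI nums l
      else if alice then
        if mni < mxi then finalElementAltLoop nums n smx smn pmx pmn fuel mxi r (!alice)
        else finalElementAltLoop nums n smx smn pmx pmn fuel l mxi (!alice)
      else
        if mni < mxi then finalElementAltLoop nums n smx smn pmx pmn fuel l mni (!alice)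
        else finalElementAltLoop nums n smx smn pmx pmn fuel mni r (!alice)
    else pvGetI nums l

def finalElement_alt (nums : List Int) : Int :=
  let n : Int := nums.length
  let s := pvSufBuild nums (n - 2) [n - 1] [n - 1]
  let p := pvPreBuild nums n 1 [0] [0]
  finalElementAltLoop nums n s.1 s.2 p.1 p.2 nums.length 0 (n - 1) true

-- ===== PRECONDITION & SPEC =====
-- Pre_ excludes only the empty list, on which Python A (and B) raise IndexError.
def Pre_finalElement (nums : List Int) : Prop := nums ≠ []
instance (nums : List Int) : Decidable (Pre_finalElement nums) := by
  unfold Pre_finalElement; infer_instance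

def pvWitness_finalElement : List Int := [3, 1, 2]

def Spec_finalElement (nums : List Int) (out : Int) : Prop := out = finalElement_alt nums
instance (nums : List Int) (out : Int) : Decidable (Spec_finalElement nums out) := by
  unfold Spec_finalElement; infer_instance

-- ===== CLAIM (what is proved, stated in full; the proofs are below) =====
def Claim_equal_finalElement : Prop :=
  ∀ (nums : List Int), Dom_finalElement nums → Pre_finalElement nums →
    Spec_finalElement nums (finalElement nums)

-- ===== LEMMAS AND PROOFS =====

-- componentwise folds of A's scan
def pvMxf (nums : List Int) (a : Int) (is : List Int) : Int :=
  is.foldl (fun m i => if pvGetI nums m ≤ pvGetI nums i then i else m) a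
def pvMnf (nums : List Int) (a : Int) (is : List Int) : Int :=
  is.foldl (fun m i => if pvGetI nums m ≥ pvGetI nums i then i else m) a

-- last index attaining the max/min of nums[l..r] (ties -> last), as A's scan computes it
def pvLMax (nums : List Int) (l r : Int) : Int := pvMxf nums l (PySem.List.pyRange l (r + 1) 1)
def pvLMin (nums : List Int) (l r : Int) : Int := pvMnf nums l (PySem.List.pyRange l (r + 1) 1)

theorem pvFoldl_pair (nums : List Int) : ∀ (is : List Int) (a b : Int),
    is.foldl (fun st i =>
      (if pvGetI nums st.1 ≤ pvGetI nums i then i else st.1,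
       if pvGetI nums st.2 ≥ pvGetI nums i then i else st.2)) (a, b)
      = (pvMxf nums a is, pvMnf nums b is) := by
  intro is
  induction is with
  | nil => intro a b; simp [pvMxf, pvMnf]
  | cons i is ih =>
    intro a b
    simp only [List.foldl_cons, pvMxf, pvMnf]
    exact ih _ _

theorem pvScan_eq (nums : List Int) (l r : Int) :
    finalElementScan nums l r = (pvLMax nums l r, pvLMin nums l r) := by
  unfold finalElementScan pvLMax pvLMin
  exact pvFoldl_pair nums _ l l

-- seed/cons combination lemma for the max fold
theorem pvMxf_cons (nums : List Int) (is : List Int) :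
    ∀ a i, pvMxf nums a (i :: is)
      = if pvGetI nums (pvMxf nums i is) < pvGetI nums a then a else pvMxf nums i is := by
  induction is with
  | nil =>
    intro a i
    simp only [pvMxf, List.foldl_cons, List.foldl_nil]
    split_ifs <;> omega
  | cons j is ih =>
    intro a i
    have h1 : pvMxf nums a (i :: j :: is)
        = pvMxf nums (if pvGetI nums a ≤ pvGetI nums i then i else a) (j :: is) := by
      simp [pvMxf]
    rw [h1, ih _ j, ih i j]
    split_ifs <;> omega

theorem pvMnf_cons (nums : List Int) (is : List Int) :
    ∀ a i, pvMnf nums a (i :: is)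
      = if pvGetI nums (pvMnf nums i is) > pvGetI nums a then a else pvMnf nums i is := by
  induction is with
  | nil =>
    intro a i
    simp only [pvMnf, List.foldl_cons, List.foldl_nil]
    split_ifs <;> omega
  | cons j is ih =>
    intro a i
    have h1 : pvMnf nums a (i :: j :: is)
        = pvMnf nums (if pvGetI nums a ≥ pvGetI nums i then i else a) (j :: is) := by
      simp [pvMnf]
    rw [h1, ih _ j, ih i j]
    split_ifs <;> omega

theorem pvLMax_self (nums : List Int) (l : Int) : pvLMax nums l l = l := by
  simp [pvLMax, pvMxf, PySem.List.pyRange_one_singleton]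

theorem pvLMin_self (nums : List Int) (l : Int) : pvLMin nums l l = l := by
  simp [pvLMin, pvMnf, PySem.List.pyRange_one_singleton]

theorem pvLMax_eq_tail (nums : List Int) (l r : Int) (h : l ≤ r) :
    pvLMax nums l r = pvMxf nums l (PySem.List.pyRange (l + 1) (r + 1) 1) := by
  rw [pvLMax, PySem.List.pyRange_one_cons (by omega : l < r + 1)]
  simp [pvMxf]

theorem pvLMin_eq_tail (nums : List Int) (l r : Int) (h : l ≤ r) :
    pvLMin nums l r = pvMnf nums l (PySem.List.pyRange (l + 1) (r + 1) 1) := by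
  rw [pvLMin, PySem.List.pyRange_one_cons (by omega : l < r + 1)]
  simp [pvMnf]

-- suffix recurrence
theorem pvLMax_suffix (nums : List Int) (l r : Int) (h : l < r) :
    pvLMax nums l r
      = if pvGetI nums (pvLMax nums (l + 1) r) < pvGetI nums l then l
        else pvLMax nums (l + 1) r := by
  rw [pvLMax_eq_tail nums l r (le_of_lt h),
      PySem.List.pyRange_one_cons (by omega : l + 1 < r + 1),
      pvMxf_cons, ← pvLMax_eq_tail nums (l + 1) r (by omega)]

theorem pvLMin_suffix (nums : List Int) (l r : Int) (h : l < r) :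
    pvLMin nums l r
      = if pvGetI nums (pvLMin nums (l + 1) r) > pvGetI nums l then l
        else pvLMin nums (l + 1) r := by
  rw [pvLMin_eq_tail nums l r (le_of_lt h),
      PySem.List.pyRange_one_cons (by omega : l + 1 < r + 1),
      pvMnf_cons, ← pvLMin_eq_tail nums (l + 1) r (by omega)]

-- prefix (snoc) recurrence
theorem pvLMax_prefix (nums : List Int) (l r : Int) (h : l ≤ r) :
    pvLMax nums l (r + 1)
      = if pvGetI nums (pvLMax nums l r) ≤ pvGetI nums (r + 1) then r + 1
        else pvLMax nums l r := by
  rw [pvLMax, pvLMax, PySem.List.pyRange_one_succ_right (by omega : l ≤ r + 1)]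
  simp [pvMxf, List.foldl_append]

theorem pvLMin_prefix (nums : List Int) (l r : Int) (h : l ≤ r) :
    pvLMin nums l (r + 1)
      = if pvGetI nums (pvLMin nums l r) ≥ pvGetI nums (r + 1) then r + 1
        else pvLMin nums l r := by
  rw [pvLMin, pvLMin, PySem.List.pyRange_one_succ_right (by omega : l ≤ r + 1)]
  simp [pvMnf, List.foldl_append]

-- bounds, extremality, strict dominance after the result index
theorem pvLMax_props (nums : List Int) (l r : Int) (h : l ≤ r) :
    l ≤ pvLMax nums l r ∧ pvLMax nums l r ≤ r ∧
    (∀ j, l ≤ j → j ≤ r → pvGetI nums j ≤ pvGetI nums (pvLMax nums l r)) ∧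
    (∀ j, pvLMax nums l r < j → j ≤ r → pvGetI nums j < pvGetI nums (pvLMax nums l r)) := by
  have H : ∀ (k : Nat) (l : Int), (r - l).toNat = k → l ≤ r →
      l ≤ pvLMax nums l r ∧ pvLMax nums l r ≤ r ∧
      (∀ j, l ≤ j → j ≤ r → pvGetI nums j ≤ pvGetI nums (pvLMax nums l r)) ∧
      (∀ j, pvLMax nums l r < j → j ≤ r → pvGetI nums j < pvGetI nums (pvLMax nums l r)) := by
    intro k
    induction k with
    | zero =>
      intro l hk hlr
      have hl : l = r := by omega
      subst hl
      rw [pvLMax_self]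
      refine ⟨le_refl _, le_refl _, ?_, ?_⟩
      · intro j h1 h2
        have : j = l := by omega
        subst this; exact le_refl _
      · intro j h1 h2; omega
    | succ k ih =>
      intro l hk hlr
      have hlt : l < r := by omega
      obtain ⟨b1, b2, hmax, hlast⟩ := ih (l + 1) (by omega) (by omega)
      rw [pvLMax_suffix nums l r hlt]
      split_ifs with hc
      · refine ⟨le_refl _, by omega, ?_, ?_⟩
        · intro j h1 h2
          rcases eq_or_lt_of_le h1 with h1' | h1'
          · subst h1'; exact le_refl _
          · exact le_of_lt (lt_of_le_of_lt (hmax j (by omega) h2) hc)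
        · intro j h1 h2
          exact lt_of_le_of_lt (hmax j (by omega) h2) hc
      · rw [not_lt] at hc
        refine ⟨by omega, b2, ?_, ?_⟩
        · intro j h1 h2
          rcases eq_or_lt_of_le h1 with h1' | h1'
          · subst h1'; exact hc
          · exact hmax j (by omega) h2
        · intro j h1 h2
          exact hlast j h1 h2
  exact H (r - l).toNat l rfl h

theorem pvLMin_props (nums : List Int) (l r : Int) (h : l ≤ r) :
    l ≤ pvLMin nums l r ∧ pvLMin nums l r ≤ r ∧
    (∀ j, l ≤ j → j ≤ r → pvGetI nums (pvLMin nums l r) ≤ pvGetI nums j) ∧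
    (∀ j, pvLMin nums l r < j → j ≤ r → pvGetI nums (pvLMin nums l r) < pvGetI nums j) := by
  have H : ∀ (k : Nat) (l : Int), (r - l).toNat = k → l ≤ r →
      l ≤ pvLMin nums l r ∧ pvLMin nums l r ≤ r ∧
      (∀ j, l ≤ j → j ≤ r → pvGetI nums (pvLMin nums l r) ≤ pvGetI nums j) ∧
      (∀ j, pvLMin nums l r < j → j ≤ r → pvGetI nums (pvLMin nums l r) < pvGetI nums j) := by
    intro k
    induction k with
    | zero =>
      intro l hk hlr
      have hl : l = r := by omega
      subst hl
      rw [pvLMin_self]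
      refine ⟨le_refl _, le_refl _, ?_, ?_⟩
      · intro j h1 h2
        have : j = l := by omega
        subst this; exact le_refl _
      · intro j h1 h2; omega
    | succ k ih =>
      intro l hk hlr
      have hlt : l < r := by omega
      obtain ⟨b1, b2, hmin, hlast⟩ := ih (l + 1) (by omega) (by omega)
      rw [pvLMin_suffix nums l r hlt]
      split_ifs with hc
      · refine ⟨le_refl _, by omega, ?_, ?_⟩
        · intro j h1 h2
          rcases eq_or_lt_of_le h1 with h1' | h1'
          · subst h1'; exact le_refl _
          · exact le_of_lt (lt_of_lt_of_le hc (hmin j (by omega) h2))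
        · intro j h1 h2
          exact lt_of_lt_of_le hc (hmin j (by omega) h2)
      · rw [not_lt] at hc
        refine ⟨by omega, b2, ?_, ?_⟩
        · intro j h1 h2
          rcases eq_or_lt_of_le h1 with h1' | h1'
          · subst h1'; exact hc
          · exact hmin j (by omega) h2
        · intro j h1 h2
          exact hlast j h1 h2
  exact H (r - l).toNat l rfl h

-- correctness of the suffix tables
theorem pvSufBuild_spec (nums : List Int) :
    ∀ (k : Nat) (i : Int) (mx mn : List Int), (i + 1).toNat = k →
    -1 ≤ i → i ≤ (nums.length : Int) - 2 →
    ((mx.length : Int) = (nums.length : Int) - 1 - i) →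
    ((mn.length : Int) = (nums.length : Int) - 1 - i) →
    (∀ (u : Nat) (hu : u < mx.length),
        mx[u] = pvLMax nums ((nums.length : Int) - 1 - u) ((nums.length : Int) - 1)) →
    (∀ (u : Nat) (hu : u < mn.length),
        mn[u] = pvLMin nums ((nums.length : Int) - 1 - u) ((nums.length : Int) - 1)) →
    (((pvSufBuild nums i mx mn).1.length : Int) = (nums.length : Int) ∧
     ((pvSufBuild nums i mx mn).2.length : Int) = (nums.length : Int) ∧
     (∀ (u : Nat) (hu : u < (pvSufBuild nums i mx mn).1.length),
        (pvSufBuild nums i mx mn).1[u]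
          = pvLMax nums ((nums.length : Int) - 1 - u) ((nums.length : Int) - 1)) ∧
     (∀ (u : Nat) (hu : u < (pvSufBuild nums i mx mn).2.length),
        (pvSufBuild nums i mx mn).2[u]
          = pvLMin nums ((nums.length : Int) - 1 - u) ((nums.length : Int) - 1))) := by
  intro k
  induction k with
  | zero =>
    intro i mx mn hk h1 h2 hlx hln hx hn
    have hi : ¬ 0 ≤ i := by omega
    rw [pvSufBuild, dif_neg hi]
    refine ⟨?_, ?_, hx, hn⟩
    · show ((mx.length : Int)) = (nums.length : Int); omega
    · show ((mn.length : Int)) = (nums.length : Int); omega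
  | succ k ih =>
    intro i mx mn hk h1 h2 hlx hln hx hn
    have hi : 0 ≤ i := by omega
    have hmxne : mx ≠ [] := by
      intro hemp; rw [hemp] at hlx; simp at hlx; omega
    have hmnne : mn ≠ [] := by
      intro hemp; rw [hemp] at hln; simp at hln; omega
    have hpm : PySem.List.pyGetD mx (-1) 0 = pvLMax nums (i + 1) ((nums.length : Int) - 1) := by
      rw [PySem.List.pyGetD_neg_one mx 0 hmxne, List.getLast_eq_getElem]
      rw [hx (mx.length - 1) (by omega)]
      congr 1
      have : ((mx.length - 1 : Nat) : Int) = (nums.length : Int) - 2 - i := by omega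
      rw [this]; ring
    have hpn : PySem.List.pyGetD mn (-1) 0 = pvLMin nums (i + 1) ((nums.length : Int) - 1) := by
      rw [PySem.List.pyGetD_neg_one mn 0 hmnne, List.getLast_eq_getElem]
      rw [hn (mn.length - 1) (by omega)]
      congr 1
      have : ((mn.length - 1 : Nat) : Int) = (nums.length : Int) - 2 - i := by omega
      rw [this]; ring
    have hvx : (if pvGetI nums i > pvGetI nums (PySem.List.pyGetD mx (-1) 0) then i
        else PySem.List.pyGetD mx (-1) 0) = pvLMax nums i ((nums.length : Int) - 1) := by
      rw [hpm, pvLMax_suffix nums i ((nums.length : Int) - 1) (by omega)]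
    have hvn : (if pvGetI nums i < pvGetI nums (PySem.List.pyGetD mn (-1) 0) then i
        else PySem.List.pyGetD mn (-1) 0) = pvLMin nums i ((nums.length : Int) - 1) := by
      rw [hpn, pvLMin_suffix nums i ((nums.length : Int) - 1) (by omega)]
    rw [pvSufBuild, dif_pos hi]
    simp only []
    rw [hvx, hvn]
    apply ih (i - 1) _ _ (by omega) (by omega) (by omega)
      (by simp; omega) (by simp; omega)
    · intro u hu
      rcases Nat.lt_or_ge u mx.length with hu' | hu'
      · rw [List.getElem_append_left hu']
        exact hx u hu'
      · have hu'' : u = mx.length := by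
          simp [List.length_append] at hu; omega
        subst hu''
        rw [List.getElem_append_right (le_refl _)]
        simp only [Nat.sub_self, List.getElem_singleton]
        congr 1
        omega
    · intro u hu
      rcases Nat.lt_or_ge u mn.length with hu' | hu'
      · rw [List.getElem_append_left hu']
        exact hn u hu'
      · have hu'' : u = mn.length := by
          simp [List.length_append] at hu; omega
        subst hu''
        rw [List.getElem_append_right (le_refl _)]
        simp only [Nat.sub_self, List.getElem_singleton]
        congr 1
        omega

-- correctness of the prefix tables
theorem pvPreBuild_spec (nums : List Int) :
    ∀ (k : Nat) (j : Int) (mx mn : List Int), ((nums.length : Int) - j).toNat = k →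
    1 ≤ j → j ≤ (nums.length : Int) →
    ((mx.length : Int) = j) → ((mn.length : Int) = j) →
    (∀ (u : Nat) (hu : u < mx.length), mx[u] = pvLMax nums 0 u) →
    (∀ (u : Nat) (hu : u < mn.length), mn[u] = pvLMin nums 0 u) →
    (((pvPreBuild nums (nums.length : Int) j mx mn).1.length : Int) = (nums.length : Int) ∧
     ((pvPreBuild nums (nums.length : Int) j mx mn).2.length : Int) = (nums.length : Int) ∧
     (∀ (u : Nat) (hu : u < (pvPreBuild nums (nums.length : Int) j mx mn).1.length),
        (pvPreBuild nums (nums.length : Int) j mx mn).1[u] = pvLMax nums 0 u) ∧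
     (∀ (u : Nat) (hu : u < (pvPreBuild nums (nums.length : Int) j mx mn).2.length),
        (pvPreBuild nums (nums.length : Int) j mx mn).2[u] = pvLMin nums 0 u)) := by
  intro k
  induction k with
  | zero =>
    intro j mx mn hk h1 h2 hlx hln hx hn
    have hj : ¬ j < (nums.length : Int) := by omega
    rw [pvPreBuild, dif_neg hj]
    refine ⟨?_, ?_, hx, hn⟩
    · show ((mx.length : Int)) = (nums.length : Int); omega
    · show ((mn.length : Int)) = (nums.length : Int); omega
  | succ k ih =>
    intro j mx mn hk h1 h2 hlx hln hx hn
    have hj : j < (nums.length : Int) := by omega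
    have hmxne : mx ≠ [] := by
      intro hemp; rw [hemp] at hlx; simp at hlx; omega
    have hmnne : mn ≠ [] := by
      intro hemp; rw [hemp] at hln; simp at hln; omega
    have hpm : PySem.List.pyGetD mx (-1) 0 = pvLMax nums 0 (j - 1) := by
      rw [PySem.List.pyGetD_neg_one mx 0 hmxne, List.getLast_eq_getElem]
      rw [hx (mx.length - 1) (by omega)]
      congr 1
      omega
    have hpn : PySem.List.pyGetD mn (-1) 0 = pvLMin nums 0 (j - 1) := by
      rw [PySem.List.pyGetD_neg_one mn 0 hmnne, List.getLast_eq_getElem]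
      rw [hn (mn.length - 1) (by omega)]
      congr 1
      omega
    have hjj : (j - 1) + 1 = j := by ring
    have hvx : (if pvGetI nums j ≥ pvGetI nums (PySem.List.pyGetD mx (-1) 0) then j
        else PySem.List.pyGetD mx (-1) 0) = pvLMax nums 0 j := by
      have h3 := pvLMax_prefix nums 0 (j - 1) (by omega)
      rw [hjj] at h3
      rw [hpm, h3]
    have hvn : (if pvGetI nums j ≤ pvGetI nums (PySem.List.pyGetD mn (-1) 0) then j
        else PySem.List.pyGetD mn (-1) 0) = pvLMin nums 0 j := by
      have h3 := pvLMin_prefix nums 0 (j - 1) (by omega)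
      rw [hjj] at h3
      rw [hpn, h3]
    rw [pvPreBuild, dif_pos hj]
    simp only []
    rw [hvx, hvn]
    apply ih (j + 1) _ _ (by omega) (by omega) (by omega)
      (by simp; omega) (by simp; omega)
    · intro u hu
      rcases Nat.lt_or_ge u mx.length with hu' | hu'
      · rw [List.getElem_append_left hu']
        exact hx u hu'
      · have hu'' : u = mx.length := by
          simp [List.length_append] at hu; omega
        subst hu''
        rw [List.getElem_append_right (le_refl _)]
        simp only [Nat.sub_self, List.getElem_singleton]
        congr 1
        omega
    · intro u hu
      rcases Nat.lt_or_ge u mn.length with hu' | hu'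
      · rw [List.getElem_append_left hu']
        exact hn u hu'
      · have hu'' : u = mn.length := by
          simp [List.length_append] at hu; omega
        subst hu''
        rw [List.getElem_append_right (le_refl _)]
        simp only [Nat.sub_self, List.getElem_singleton]
        congr 1
        omega

-- the loop invariant: either the very first round, or the window pinned to the
-- right end with a strictly dominated left boundary, or pinned to the left end
-- with a (weakly) dominated right boundary
def pvInv (nums : List Int) (l r : Int) (alice : Bool) : Prop :=
  (l = 0 ∧ r = (nums.length : Int) - 1 ∧ alice = true) ∨
  (r = (nums.length : Int) - 1 ∧ 0 ≤ l ∧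
    ∀ j, l < j → j ≤ r →
      (if alice then pvGetI nums l < pvGetI nums j else pvGetI nums j < pvGetI nums l)) ∨
  (l = 0 ∧ 0 ≤ r ∧ r ≤ (nums.length : Int) - 1 ∧
    ∀ j, 0 ≤ j → j < r →
      (if alice then pvGetI nums r ≤ pvGetI nums j else pvGetI nums j ≤ pvGetI nums r))

theorem pvLoop_eq (nums : List Int) (smx smn pmx pmn : List Int)
    (hsl : (smx.length : Int) = (nums.length : Int))
    (hsl' : (smn.length : Int) = (nums.length : Int))
    (hpl : (pmx.length : Int) = (nums.length : Int))
    (hpl' : (pmn.length : Int) = (nums.length : Int))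
    (hsx : ∀ (u : Nat) (hu : u < smx.length),
      smx[u] = pvLMax nums ((nums.length : Int) - 1 - u) ((nums.length : Int) - 1))
    (hsn : ∀ (u : Nat) (hu : u < smn.length),
      smn[u] = pvLMin nums ((nums.length : Int) - 1 - u) ((nums.length : Int) - 1))
    (hpx : ∀ (u : Nat) (hu : u < pmx.length), pmx[u] = pvLMax nums 0 u)
    (hpn : ∀ (u : Nat) (hu : u < pmn.length), pmn[u] = pvLMin nums 0 u) :
    ∀ (fuel : Nat) (l r t : Int) (alice : Bool), 0 ≤ t →
      (PySem.Int.mod t 2 = 1 ↔ alice = true) → pvInv nums l r alice →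
      finalElementLoop nums fuel l r t
        = finalElementAltLoop nums (nums.length : Int) smx smn pmx pmn fuel l r alice := by
  intro fuel
  induction fuel with
  | zero => intro l r t alice ht hpar hinv; rfl
  | succ fuel ih =>
    intro l r t alice ht hpar hinv
    by_cases hlr : l < r
    · have h0l : 0 ≤ l := by
        rcases hinv with ⟨h1, h2, h3⟩ | ⟨h1, h2, h3⟩ | ⟨h1, h2, h3, h4⟩ <;> omega
      have hrn : r ≤ (nums.length : Int) - 1 := by
        rcases hinv with ⟨h1, h2, h3⟩ | ⟨h1, h2, h3⟩ | ⟨h1, h2, h3, h4⟩ <;> omega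
      have hp := pvScan_eq nums l r
      have hmxi : (if r = (nums.length : Int) - 1
            then PySem.List.pyGetD smx ((nums.length : Int) - 1 - l) 0
            else PySem.List.pyGetD pmx r 0) = pvLMax nums l r := by
        by_cases hr : r = (nums.length : Int) - 1
        · rw [if_pos hr]
          rw [PySem.List.pyGetD_eq_getElem smx 0 (by omega) (by omega)]
          rw [hsx ((nums.length : Int) - 1 - l).toNat (by omega)]
          have hc : ((((nums.length : Int) - 1 - l).toNat : Int)) = (nums.length : Int) - 1 - l := by
            omega
          rw [hc, hr]
          congr 1
          ring
        · rw [if_neg hr]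
          have hl0 : l = 0 := by
            rcases hinv with ⟨h1, h2, h3⟩ | ⟨h1, h2, h3⟩ | ⟨h1, h2, h3, h4⟩ <;> omega
          rw [PySem.List.pyGetD_eq_getElem pmx 0 (by omega) (by omega)]
          rw [hpx r.toNat (by omega)]
          rw [hl0]
          congr 1
          omega
      have hmni : (if r = (nums.length : Int) - 1
            then PySem.List.pyGetD smn ((nums.length : Int) - 1 - l) 0
            else PySem.List.pyGetD pmn r 0) = pvLMin nums l r := by
        by_cases hr : r = (nums.length : Int) - 1
        · rw [if_pos hr]
          rw [PySem.List.pyGetD_eq_getElem smn 0 (by omega) (by omega)]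
          rw [hsn ((nums.length : Int) - 1 - l).toNat (by omega)]
          have hc : ((((nums.length : Int) - 1 - l).toNat : Int)) = (nums.length : Int) - 1 - l := by
            omega
          rw [hc, hr]
          congr 1
          ring
        · rw [if_neg hr]
          have hl0 : l = 0 := by
            rcases hinv with ⟨h1, h2, h3⟩ | ⟨h1, h2, h3⟩ | ⟨h1, h2, h3, h4⟩ <;> omega
          rw [PySem.List.pyGetD_eq_getElem pmn 0 (by omega) (by omega)]
          rw [hpn r.toNat (by omega)]
          rw [hl0]
          congr 1
          omega
      obtain ⟨hL1, hL2, hL3, hL4⟩ := pvLMax_props nums l r (le_of_lt hlr)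
      obtain ⟨hM1, hM2, hM3, hM4⟩ := pvLMin_props nums l r (le_of_lt hlr)
      simp only [finalElementLoop, finalElementAltLoop, if_pos hlr, hp, hmxi, hmni]
      by_cases heq : pvLMax nums l r = pvLMin nums l r
      · rw [if_pos heq, if_pos heq]
      · rw [if_neg heq, if_neg heq]
        have hmod : PySem.Int.mod t 2 = t % 2 := PySem.Int.mod_eq_emod_of_pos (by norm_num)
        have hmod' : PySem.Int.mod (t + 1) 2 = (t + 1) % 2 :=
          PySem.Int.mod_eq_emod_of_pos (by norm_num)
        rcases Bool.eq_false_or_eq_true alice with halice | halice <;> subst halice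
        · have ht1 : t % 2 = 1 := by
            have := hpar.2 rfl
            rw [hmod] at this
            exact this
          rw [if_pos (show PySem.Int.mod t 2 ≠ 0 by rw [hmod]; omega), if_pos rfl]
          by_cases hd : pvLMin nums l r < pvLMax nums l r
          · rw [if_pos hd, if_pos hd]
            simp only [Bool.not_true]
            apply ih _ _ (t + 1) false (by omega)
              (by rw [hmod']
                  constructor
                  · intro h; exfalso; omega
                  · intro h; exact absurd h (by simp))
            -- new invariant for state (LMax, r)
            rcases hinv with ⟨h1, h2, h3⟩ | ⟨h1, h2, h3⟩ | ⟨h1, h2, h3, h4⟩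
            · right; left
              refine ⟨h2, by omega, ?_⟩
              intro j hj1 hj2
              rw [if_neg Bool.false_ne_true]
              exact hL4 j hj1 hj2
            · right; left
              refine ⟨h1, by omega, ?_⟩
              intro j hj1 hj2
              rw [if_neg Bool.false_ne_true]
              exact hL4 j hj1 hj2
            · -- prefix/alice: LMin = r, contradicting hd
              exfalso
              have hminr : pvLMin nums l r = r := by
                by_contra hne
                have hlt : pvLMin nums l r < r := by omega
                have hv1 := h4 (pvLMin nums l r) (by omega) hlt
                rw [if_pos rfl] at hv1
                have hv2 := hM4 r hlt (le_refl r)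
                omega
              omega
          · rw [if_neg hd, if_neg hd]
            simp only [Bool.not_true]
            have hd' : pvLMax nums l r < pvLMin nums l r := by omega
            apply ih _ _ (t + 1) false (by omega)
              (by rw [hmod']
                  constructor
                  · intro h; exfalso; omega
                  · intro h; exact absurd h (by simp))
            -- new invariant for state (l, LMax)
            rcases hinv with ⟨h1, h2, h3⟩ | ⟨h1, h2, h3⟩ | ⟨h1, h2, h3, h4⟩
            · right; right
              refine ⟨h1, by omega, by omega, ?_⟩
              intro j hj1 hj2
              rw [if_neg Bool.false_ne_true]
              exact hL3 j (by omega) (by omega)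
            · -- suffix/alice: LMin = l, contradicting hd'
              exfalso
              have hminl : pvLMin nums l r = l := by
                by_contra hne
                have hlt : l < pvLMin nums l r := by omega
                have hv1 := h3 (pvLMin nums l r) hlt (by omega)
                rw [if_pos rfl] at hv1
                have hv2 := hM3 l (le_refl l) (by omega)
                omega
              omega
            · right; right
              refine ⟨h1, by omega, by omega, ?_⟩
              intro j hj1 hj2
              rw [if_neg Bool.false_ne_true]
              exact hL3 j (by omega) (by omega)
        · have ht0 : t % 2 = 0 := by
            have hne1 : PySem.Int.mod t 2 ≠ 1 := by
              intro h
              exact Bool.false_ne_true (hpar.1 h)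
            rw [hmod] at hne1
            omega
          rw [if_neg (show ¬ PySem.Int.mod t 2 ≠ 0 by rw [hmod]; omega),
              if_neg (Bool.false_ne_true)]
          by_cases hd : pvLMin nums l r < pvLMax nums l r
          · rw [if_pos hd, if_pos hd]
            simp only [Bool.not_false]
            apply ih _ _ (t + 1) true (by omega)
              (by rw [hmod']
                  constructor
                  · intro _; rfl
                  · intro _; omega)
            -- new invariant for state (l, LMin)
            rcases hinv with ⟨h1, h2, h3⟩ | ⟨h1, h2, h3⟩ | ⟨h1, h2, h3, h4⟩
            · exact absurd h3 Bool.false_ne_true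
            · -- suffix/bob: LMax = l, contradicting hd
              exfalso
              have hmaxl : pvLMax nums l r = l := by
                by_contra hne
                have hlt : l < pvLMax nums l r := by omega
                have hv1 := h3 (pvLMax nums l r) hlt (by omega)
                rw [if_neg Bool.false_ne_true] at hv1
                have hv2 := hL3 l (le_refl l) (by omega)
                omega
              omega
            · -- prefix/bob: LMax = r
              have hmaxr : pvLMax nums l r = r := by
                by_contra hne
                have hlt : pvLMax nums l r < r := by omega
                have hv1 := h4 (pvLMax nums l r) (by omega) hlt
                rw [if_neg Bool.false_ne_true] at hv1
                have hv2 := hL4 r hlt (le_refl r)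
                omega
              right; right
              refine ⟨h1, by omega, by omega, ?_⟩
              intro j hj1 hj2
              rw [if_pos rfl]
              exact hM3 j (by omega) (by omega)
          · rw [if_neg hd, if_neg hd]
            simp only [Bool.not_false]
            have hd' : pvLMax nums l r < pvLMin nums l r := by omega
            apply ih _ _ (t + 1) true (by omega)
              (by rw [hmod']
                  constructor
                  · intro _; rfl
                  · intro _; omega)
            -- new invariant for state (LMin, r)
            rcases hinv with ⟨h1, h2, h3⟩ | ⟨h1, h2, h3⟩ | ⟨h1, h2, h3, h4⟩
            · exact absurd h3 Bool.false_ne_true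
            · -- suffix/bob: LMax = l
              have hmaxl : pvLMax nums l r = l := by
                by_contra hne
                have hlt : l < pvLMax nums l r := by omega
                have hv1 := h3 (pvLMax nums l r) hlt (by omega)
                rw [if_neg Bool.false_ne_true] at hv1
                have hv2 := hL3 l (le_refl l) (by omega)
                omega
              right; left
              refine ⟨h1, by omega, ?_⟩
              intro j hj1 hj2
              rw [if_pos rfl]
              exact hM4 j hj1 hj2
            · -- prefix/bob: LMax = r, contradicting hd'
              exfalso
              have hmaxr : pvLMax nums l r = r := by
                by_contra hne
                have hlt : pvLMax nums l r < r := by omega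
                have hv1 := h4 (pvLMax nums l r) (by omega) hlt
                rw [if_neg Bool.false_ne_true] at hv1
                have hv2 := hL4 r hlt (le_refl r)
                omega
              omega
    · simp only [finalElementLoop, finalElementAltLoop, if_neg hlr]

-- ===== VERDICT (by name: the statement is the Claim_ definition above) =====
theorem finalElement_spec : Claim_equal_finalElement := by
  intro nums _hdom hpre
  have hn : 1 ≤ (nums.length : Int) := by
    have h := List.length_pos_of_ne_nil hpre
    omega
  obtain ⟨hs1, hs2, hs3, hs4⟩ := pvSufBuild_spec nums ((((nums.length : Int) - 2) + 1).toNat)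
    ((nums.length : Int) - 2) [(nums.length : Int) - 1] [(nums.length : Int) - 1]
    rfl (by omega) (by omega) (by simp) (by simp)
    (by intro u hu
        simp only [List.length_singleton] at hu
        have hu0 : u = 0 := by omega
        subst hu0
        simpa using (pvLMax_self nums ((nums.length : Int) - 1)).symm)
    (by intro u hu
        simp only [List.length_singleton] at hu
        have hu0 : u = 0 := by omega
        subst hu0
        simpa using (pvLMin_self nums ((nums.length : Int) - 1)).symm)
  obtain ⟨hp1, hp2, hp3, hp4⟩ := pvPreBuild_spec nums (((nums.length : Int) - 1).toNat) 1 [0] [0]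
    (by omega) (by omega) (by omega) (by simp) (by simp)
    (by intro u hu
        simp only [List.length_singleton] at hu
        have hu0 : u = 0 := by omega
        subst hu0
        simpa using (pvLMax_self nums 0).symm)
    (by intro u hu
        simp only [List.length_singleton] at hu
        have hu0 : u = 0 := by omega
        subst hu0
        simpa using (pvLMin_self nums 0).symm)
  show finalElement nums = finalElement_alt nums
  exact pvLoop_eq nums _ _ _ _ hs1 hs2 hp1 hp2 hs3 hs4 hp3 hp4 nums.length 0
    ((nums.length : Int) - 1) 1 true (by norm_num)
    (by rw [PySem.Int.mod_eq_emod_of_pos (by norm_num)]; norm_num)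
    (Or.inl ⟨rfl, rfl, rfl⟩)
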